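-- pv_equiv track=rewrite | github.com/dips181/python-basic | request/list/smallest.py | count_func
-- ===== SOURCE A (Python) =====
-- def count_func(list4):
--     ncount=0
--     pcount=0
--     for x in list4:
--         if(x<0):
--             ncount=ncount+1
--         elif(x>0):
--             pcount=pcount+1
--     return ncount,pcount
-- ===== SOURCE B (Python) =====
-- def _boundary(s, pred):
--     # Binary search: s has pred True on a prefix and False afterwards;
--     # return the length of that prefix.
--     lo, hi = 0, len(s)
--     while lo < hi:
--         mid = (lo + hi) // 2
--         if pred(s[mid]):
--             lo = mid + 1
--         else:
--             hi = mid
--     return lo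
--
-- def count_func(list4):
--     # Sort, then binary-search for the negative/zero boundaries.
--     s = sorted(list4)
--     neg = _boundary(s, lambda x: x < 0)
--     nonpos = _boundary(s, lambda x: x <= 0)
--     return (neg, len(s) - nonpos)
-- ===== Notes on version B (the rewrite author's own statement) =====
-- stated objective: alternative
-- what changed: Instead of one linear counting pass, B sorts the list and locates the negative/zero boundaries with two hand-written binary searches, deriving the counts from the boundary indices.
import Mathlib
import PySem

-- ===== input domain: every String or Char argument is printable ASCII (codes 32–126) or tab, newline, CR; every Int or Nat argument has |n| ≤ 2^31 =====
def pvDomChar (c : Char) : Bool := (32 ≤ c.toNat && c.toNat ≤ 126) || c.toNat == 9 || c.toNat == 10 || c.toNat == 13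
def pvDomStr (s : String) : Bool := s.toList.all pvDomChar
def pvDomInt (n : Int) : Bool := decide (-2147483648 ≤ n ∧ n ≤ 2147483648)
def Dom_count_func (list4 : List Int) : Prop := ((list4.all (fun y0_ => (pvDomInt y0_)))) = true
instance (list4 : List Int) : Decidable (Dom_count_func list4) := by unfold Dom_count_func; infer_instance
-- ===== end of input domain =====

-- B replaces A's single counting pass by sort + two binary searches for the sign boundaries (alternative algorithm; not faster).

-- ===== PORT A =====
-- A: one fold over the list carrying (ncount, pcount), if/elif in order
def count_func (list4 : List Int) : Int × Int :=
  list4.foldl (fun (acc : Int × Int) x =>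
    if x < 0 then (acc.1 + 1, acc.2)
    else if x > 0 then (acc.1, acc.2 + 1)
    else acc) (0, 0)

-- ===== PORT B =====
-- B helper _boundary: binary search for the length of the prefix on which pred holds.
-- s[mid] always has lo ≤ mid < hi ≤ len s in B, so getD with a default is exact there.
def pvBoundary (s : List Int) (pred : Int → Bool) (lo hi : Nat) : Nat :=
  if lo < hi then
    let mid := (lo + hi) / 2
    if pred (s.getD mid 0) then pvBoundary s pred (mid + 1) hi
    else pvBoundary s pred lo mid
  else lo
termination_by hi - lo
decreasing_by all_goals omega

-- B: sort, binary-search the negative/zero boundaries, derive the counts from the indices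
def count_func_alt (list4 : List Int) : Int × Int :=
  let s := PySem.List.sorted list4 (fun x => x) false
  let neg := pvBoundary s (fun x => decide (x < 0)) 0 s.length
  let nonpos := pvBoundary s (fun x => decide (x ≤ 0)) 0 s.length
  ((neg : Int), (s.length : Int) - (nonpos : Int))

-- ===== PRECONDITION & SPEC =====
def Spec_count_func (list4 : List Int) (out : Int × Int) : Prop := out = count_func_alt list4
instance (list4 : List Int) (out : Int × Int) : Decidable (Spec_count_func list4 out) := by unfold Spec_count_func; infer_instance

-- ===== CLAIM =====
def Claim_equal_count_func : Prop := ∀ (list4 : List Int), Dom_count_func list4 → Spec_count_func list4 (count_func list4)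

-- ===== LEMMAS AND PROOFS =====

-- the binary search returns k when pred is true exactly on the first k positions
theorem pvBoundary_eq (s : List Int) (pred : Int → Bool) (k : Nat)
    (htrue : ∀ i, i < k → pred (s.getD i 0) = true)
    (hfalse : ∀ i, k ≤ i → i < s.length → pred (s.getD i 0) = false) :
    ∀ lo hi, lo ≤ k → k ≤ hi → hi ≤ s.length → pvBoundary s pred lo hi = k := by
  intro lo hi
  fun_induction pvBoundary s pred lo hi
  case case1 =>
    rename_i lo hi hlt mid hp ih
    intro h1 h2 h3
    have hmidk : mid < k := by
      by_contra hc
      have := hfalse mid (by omega) (by omega)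
      rw [hp] at this; exact absurd this (by simp)
    exact ih (by omega) h2 h3
  case case2 =>
    rename_i lo hi hlt mid hp ih
    intro h1 h2 h3
    have hmidk : k ≤ mid := by
      by_contra hc
      have := htrue mid (by omega)
      rw [this] at hp; exact absurd rfl hp
    exact ih h1 hmidk (by omega)
  case case3 =>
    rename_i lo hi hge
    intro h1 h2 _; omega

-- in a sorted list, a downward-closed predicate holds exactly on a prefix of length countP
theorem pred_prefix (pred : Int → Bool)
    (hmono : ∀ x y : Int, x ≤ y → pred y = true → pred x = true) :
    ∀ (s : List Int), s.Pairwise (· ≤ ·) →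
      ∀ i, i < s.length → (pred (s.getD i 0) = true ↔ i < s.countP pred) := by
  intro s
  induction s with
  | nil => intro _ i hi; simp at hi
  | cons a t ih =>
    intro hp i hi
    rcases List.pairwise_cons.mp hp with ⟨ha, ht⟩
    by_cases hpa : pred a = true
    · cases i with
      | zero => simp [hpa]
      | succ j =>
        have hj : j < t.length := by simpa using hi
        have := ih ht j hj
        simp only [List.getD_cons_succ, List.countP_cons, hpa]
        simpa [Nat.succ_lt_succ_iff] using this
    · have hpt : t.countP pred = 0 := by
        apply List.countP_eq_zero.mpr
        intro b hb hpb
        exact hpa (hmono a b (ha b hb) hpb)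
      cases i with
      | zero => simp [hpa, hpt]
      | succ j =>
        have hj : j < t.length := by simpa using hi
        have hb : t.getD j 0 ∈ t := by
          rw [List.getD_eq_getElem t 0 hj]; exact List.getElem_mem hj
        have : pred (t.getD j 0) = false := by
          by_contra hc
          exact hpa (hmono a _ (ha _ hb) (by simpa using hc))
        simp only [List.getD] at this ⊢
        simp [hpa, hpt, this]

-- closed form of A's fold
theorem loopA (l : List Int) (n p : Int) :
    l.foldl (fun (acc : Int × Int) x =>
      if x < 0 then (acc.1 + 1, acc.2)
      else if x > 0 then (acc.1, acc.2 + 1)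
      else acc) (n, p)
    = (n + (l.countP (fun x => decide (x < 0)) : Int),
       p + (l.countP (fun x => decide (0 < x)) : Int)) := by
  induction l generalizing n p with
  | nil => simp
  | cons y ys ih =>
    simp only [List.foldl_cons, List.countP_cons]
    by_cases h1 : y < 0
    · have h2 : ¬ y > 0 := by omega
      simp only [ih, h1, h2, decide_true, decide_false, if_true, if_false]
      rw [Prod.mk.injEq]; push_cast; omega
    · by_cases h2 : y > 0
      · simp only [ih, h1, h2, decide_true, decide_false, if_true, if_false]
        rw [Prod.mk.injEq]; push_cast; omega
      · simp only [ih, h1, h2, decide_false, if_false]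
        rw [Prod.mk.injEq]; push_cast; omega

-- the two branch counts partition the nonzero... err: the ≤0 and >0 counts partition the list
theorem countP_split (l : List Int) :
    l.countP (fun x => decide (x ≤ 0)) + l.countP (fun x => decide (0 < x)) = l.length := by
  induction l with
  | nil => simp
  | cons a t iht =>
    simp only [List.countP_cons, List.length_cons]
    by_cases h : a ≤ 0
    · have h2 : ¬ a > 0 := by omega
      simp [h, h2]; omega
    · have h2 : (0:Int) < a := by omega
      simp [h, h2]; omega

-- boundary value for a sorted list: pvBoundary over the whole range is countP
theorem pvBoundary_full (s : List Int) (pred : Int → Bool)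
    (hmono : ∀ x y : Int, x ≤ y → pred y = true → pred x = true)
    (hp : s.Pairwise (· ≤ ·)) :
    pvBoundary s pred 0 s.length = s.countP pred := by
  apply pvBoundary_eq s pred (s.countP pred)
  · intro i hik
    have hi : i < s.length := lt_of_lt_of_le hik (List.countP_le_length (p := pred) (l := s))
    exact (pred_prefix pred hmono s hp i hi).mpr hik
  · intro i hki hi
    have := pred_prefix pred hmono s hp i hi
    by_contra hc
    have : i < s.countP pred := this.mp (by simpa using hc)
    omega
  · exact Nat.zero_le _
  · exact List.countP_le_length (p := pred) (l := s)
  · exact le_refl _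

-- ===== VERDICT =====
theorem count_func_spec : Claim_equal_count_func := by
  intro list4 _
  unfold Spec_count_func count_func count_func_alt
  rw [loopA]
  have hperm : (PySem.List.sorted list4 (fun x => x) false).Perm list4 :=
    PySem.List.sorted_perm list4 (fun x => x) false
  have hpair : (PySem.List.sorted list4 (fun x => x) false).Pairwise (· ≤ ·) := by
    simpa using PySem.List.sorted_pairwise list4 (fun x => x)
  set s := PySem.List.sorted list4 (fun x => x) false with hs
  have hneg : pvBoundary s (fun x => decide (x < 0)) 0 s.length
      = s.countP (fun x => decide (x < 0)) :=
    pvBoundary_full s _ (by intro x y hxy h; simp at *; omega) hpair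
  have hnp : pvBoundary s (fun x => decide (x ≤ 0)) 0 s.length
      = s.countP (fun x => decide (x ≤ 0)) :=
    pvBoundary_full s _ (by intro x y hxy h; simp at *; omega) hpair
  simp only [hneg, hnp]
  have hc1 : s.countP (fun x => decide (x < 0)) = list4.countP (fun x => decide (x < 0)) :=
    hperm.countP_eq _
  have hc2 : s.countP (fun x => decide (x ≤ 0)) = list4.countP (fun x => decide (x ≤ 0)) :=
    hperm.countP_eq _
  have hlen : s.length = list4.length := hperm.length_eq
  rw [hc1, hc2, hlen]
  rw [Prod.mk.injEq]
  refine ⟨by omega, ?_⟩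
  have := countP_split list4
  omega
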